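-- pv_equiv track=rewrite | github.com/JangYuBBin/PROGRAMMERS | LV1/약수의 개수와 덧셈.py | solution
-- ===== SOURCE A (Python) =====
-- from math import sqrt
--
-- def count(num):
--     answer = 0
--
--     if num == 1:
--         return 1
--     else:
--         pass
--
--     for i in range(1, int(sqrt(num)) + 1, 1):
--         if num % i == 0:
--             j = num // i
--
--             if i == j:
--                 answer += 1
--             else:
--                 answer += 2
--
--     return answer
--
-- def solution(left, right):
--     answer = 0
--
--     for i in range(left, right + 1, 1):
--         if count(i) % 2 == 0:
--             answer += i
--         else:
--             answer -= i
--
--     return answer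
-- ===== SOURCE B (Python) =====
-- from math import isqrt
--
-- def solution(left, right):
--     # a number has an odd divisor count iff it is a perfect square
--     total = 0
--     for i in range(left, right + 1):
--         if isqrt(i) ** 2 == i:
--             total -= i
--         else:
--             total += i
--     return total
-- ===== Notes on version B (the rewrite author's own statement) =====
-- stated objective: alternative
-- what changed: B replaces A's per-number trial-division divisor count (an inner loop up to sqrt(i) for every i) by the single perfect-square test isqrt(i)**2 == i, using that a number has an odd divisor count iff it is a perfect square.
-- outside the precondition, e.g. on solution(-2, 1): A raises ValueError, B raises ValueError
import Mathlib
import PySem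

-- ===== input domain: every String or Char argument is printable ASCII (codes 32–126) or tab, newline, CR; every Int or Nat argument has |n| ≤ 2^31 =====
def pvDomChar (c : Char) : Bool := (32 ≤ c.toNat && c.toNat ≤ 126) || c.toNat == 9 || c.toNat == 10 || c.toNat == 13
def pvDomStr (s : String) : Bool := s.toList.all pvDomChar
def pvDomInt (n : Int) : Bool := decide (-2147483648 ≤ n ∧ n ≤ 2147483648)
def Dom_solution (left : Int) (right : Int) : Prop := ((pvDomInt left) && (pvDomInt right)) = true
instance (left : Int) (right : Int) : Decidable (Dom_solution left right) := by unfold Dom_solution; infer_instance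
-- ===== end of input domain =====

-- B replaces A's per-number trial-division divisor count by the perfect-square test
-- isqrt(i)**2 == i (odd divisor count ⟺ perfect square); objective: alternative.

-- ===== PORT A =====
-- int(sqrt(num)) is ported as Nat.sqrt num.toNat: exact for 0 ≤ num ≤ 2^31 (the float sqrt
-- is correctly rounded and the error is far below 1 there); for num < 0 Python raises
-- ValueError — those inputs are excluded by Pre_solution.
def count (num : Int) : Int :=
  if num == 1 then 1
  else
    (PySem.List.pyRange 1 ((Nat.sqrt num.toNat : Int) + 1) 1).foldl
      (fun answer i =>
        if PySem.Int.mod num i == 0 then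
          let j := PySem.Int.floordiv num i
          if i == j then answer + 1 else answer + 2
        else answer) 0

def solution (left : Int) (right : Int) : Int :=
  (PySem.List.pyRange left (right + 1) 1).foldl
    (fun answer i => if PySem.Int.mod (count i) 2 == 0 then answer + i else answer - i) 0

-- ===== PORT B =====
-- math.isqrt(i) is ported as Nat.sqrt i.toNat (exact; math.isqrt raises ValueError for
-- i < 0 — excluded by Pre_solution).
def solution_alt (left : Int) (right : Int) : Int :=
  (PySem.List.pyRange left (right + 1) 1).foldl
    (fun total i => if ((Nat.sqrt i.toNat : Int)) ^ 2 == i then total - i else total + i) 0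

-- ===== PRECONDITION & SPEC =====
-- Pre_ excludes exactly the inputs where the range contains a negative number: there A's
-- math.sqrt (and B's math.isqrt) raises ValueError.
def Pre_solution (left : Int) (right : Int) : Prop := 0 ≤ left ∨ right < left
instance (left : Int) (right : Int) : Decidable (Pre_solution left right) := by unfold Pre_solution; infer_instance
def pvWitness_solution : Int × Int := (1, 10)

def Spec_solution (left : Int) (right : Int) (out : Int) : Prop := out = solution_alt left right
instance (left : Int) (right : Int) (out : Int) : Decidable (Spec_solution left right out) := by unfold Spec_solution; infer_instance

-- ===== CLAIM (what is proved, stated in full; the proofs are below) =====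
def Claim_equal_solution : Prop := ∀ (left : Int) (right : Int), Dom_solution left right → Pre_solution left right → Spec_solution left right (solution left right)

-- ===== LEMMAS AND PROOFS =====

-- A's divisor-counting step, named for the proofs below.
def countStep (num : Int) : Int → Int → Int :=
  fun answer i =>
    if PySem.Int.mod num i == 0 then
      let j := PySem.Int.floordiv num i
      if i == j then answer + 1 else answer + 2
    else answer

theorem countStep_spec (num : Int) : count num =
    (if num == 1 then 1
     else (PySem.List.pyRange 1 ((Nat.sqrt num.toNat : Int) + 1) 1).foldl (countStep num) 0) := rfl

-- parity of the partial fold over 1..t : it is odd exactly when the square root has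
-- already been passed and num is a perfect square
theorem countFold_parity (num : Int) (hn : 1 ≤ num) (t : Nat)
    (ht : t ≤ Nat.sqrt num.toNat) :
    ((PySem.List.pyRange 1 ((t : Int) + 1) 1).foldl (countStep num) 0) % 2 =
      (if t = Nat.sqrt num.toNat ∧ Nat.sqrt num.toNat * Nat.sqrt num.toNat = num.toNat
       then 1 else 0) := by
  induction t with
  | zero =>
    have hs : 0 < Nat.sqrt num.toNat := Nat.sqrt_pos.mpr (by omega)
    rw [show ((0:Nat):Int) + 1 = 1 by norm_num, PySem.List.pyRange_one_eq_nil le_rfl]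
    rw [if_neg]
    · rfl
    · rintro ⟨h1, -⟩; omega
  | succ t ih =>
    have ht' : t ≤ Nat.sqrt num.toNat := Nat.le_of_succ_le ht
    have ihv := ih ht'
    have hold : ¬ (t = Nat.sqrt num.toNat ∧
        Nat.sqrt num.toNat * Nat.sqrt num.toNat = num.toNat) := by
      rintro ⟨h1, -⟩; omega
    rw [if_neg hold] at ihv
    rw [show (((t+1:Nat)):Int) + 1 = ((t:Int) + 1) + 1 by push_cast; ring]
    rw [PySem.List.pyRange_one_succ_right (by omega : (1:Int) ≤ (t:Int)+1)]
    rw [List.foldl_append]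
    simp only [List.foldl_cons, List.foldl_nil]
    set F := List.foldl (countStep num) 0 (PySem.List.pyRange 1 ((t:Int) + 1) 1) with hF
    set i : Int := (t:Int) + 1 with hi
    have hi0 : 0 < i := by omega
    have hc : (((t+1)*(t+1) : Nat) : Int) = i * i := by push_cast; ring
    unfold countStep
    by_cases hd : i ∣ num
    · have hm0 : PySem.Int.mod num i = 0 := (PySem.Int.mod_eq_zero_iff_dvd num i).mpr hd
      have hfd : PySem.Int.floordiv num i = num / i := PySem.Int.floordiv_eq_ediv_of_pos hi0
      simp only [hm0, hfd, beq_self_eq_true, if_true, beq_iff_eq]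
      by_cases hij : i = num / i
      · have hsq : i * i = num := by
          conv_rhs => rw [← Int.ediv_mul_cancel hd]
          rw [← hij]
        have hC : (((t+1)*(t+1) : Nat) : Int) = num := hc.trans hsq
        have hnat : (t+1)*(t+1) = num.toNat := by omega
        have hroot : Nat.sqrt num.toNat = t + 1 := by
          rw [← hnat, show (t+1)*(t+1) = (t+1)^2 from (sq (t+1)).symm]
          exact Nat.sqrt_eq' (t+1)
        rw [if_pos hij, if_pos ⟨hroot.symm, by rw [hroot, hnat]⟩]
        omega
      · rw [if_neg hij, if_neg]
        · omega
        · rintro ⟨h1, h2⟩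
          apply hij
          have hC : (((t+1)*(t+1) : Nat) : Int) = num := by
            rw [show (t+1)*(t+1) = num.toNat by rw [h1]; exact h2,
              Int.toNat_of_nonneg (by omega)]
          have hsq : i * i = num := by rw [← hc]; exact hC
          rw [← hsq, Int.mul_ediv_cancel_left i (by omega)]
    · have hm0 : PySem.Int.mod num i ≠ 0 := fun h => hd ((PySem.Int.mod_eq_zero_iff_dvd num i).mp h)
      rw [if_neg (by simpa using hm0), if_neg]
      · exact ihv
      · rintro ⟨h1, h2⟩
        apply hd
        have hC : (((t+1)*(t+1) : Nat) : Int) = num := by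
          rw [show (t+1)*(t+1) = num.toNat by rw [h1]; exact h2,
            Int.toNat_of_nonneg (by omega)]
        have hsq : i * i = num := by rw [← hc]; exact hC
        exact ⟨i, hsq.symm⟩

theorem count_parity (num : Int) (hn : 0 ≤ num) :
    PySem.Int.mod (count num) 2 =
      (if ((Nat.sqrt num.toNat : Int)) ^ 2 = num ∧ num ≠ 0 then 1 else 0) := by
  by_cases h1 : num = 1
  · subst h1; decide
  · by_cases h0 : num = 0
    · subst h0; decide
    · have hn1 : 1 ≤ num := by omega
      have hb : (num == 1) = false := by simp [h1]
      rw [countStep_spec, hb, if_neg (by simp)]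
      rw [PySem.Int.mod_eq_emod_of_pos (by norm_num)]
      rw [countFold_parity num hn1 (Nat.sqrt num.toNat) le_rfl]
      have hcast : ((Nat.sqrt num.toNat : Int)) ^ 2 =
          ((Nat.sqrt num.toNat * Nat.sqrt num.toNat : Nat) : Int) := by push_cast; ring
      by_cases hm : Nat.sqrt num.toNat * Nat.sqrt num.toNat = num.toNat
      · rw [if_pos ⟨rfl, hm⟩, if_pos]
        refine ⟨?_, h0⟩
        rw [hcast, hm, Int.toNat_of_nonneg (by omega)]
      · rw [if_neg (by rintro ⟨-, h⟩; exact hm h), if_neg]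
        rintro ⟨h, -⟩
        apply hm
        rw [hcast] at h
        omega

theorem step_eq (n : Int) (hn : 0 ≤ n) (acc : Int) :
    (if PySem.Int.mod (count n) 2 == 0 then acc + n else acc - n) =
      (if ((Nat.sqrt n.toNat : Int)) ^ 2 == n then acc - n else acc + n) := by
  have h := count_parity n hn
  by_cases h0 : n = 0
  · subst h0
    have h1 : (PySem.Int.mod (count 0) 2 == 0) = true := by decide
    have h2 : (((Nat.sqrt (0:Int).toNat : Int)) ^ 2 == (0:Int)) = true := by decide
    rw [h1, h2]
    simp
  · by_cases hsq : ((Nat.sqrt n.toNat : Int)) ^ 2 = n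
    · have hm : PySem.Int.mod (count n) 2 = 1 := by rw [h, if_pos ⟨hsq, h0⟩]
      have hA : (PySem.Int.mod (count n) 2 == 0) = false := by rw [hm]; rfl
      have hB : (((Nat.sqrt n.toNat : Int)) ^ 2 == n) = true := beq_iff_eq.mpr hsq
      rw [hA, hB]
      simp
    · have hm : PySem.Int.mod (count n) 2 = 0 := by
        rw [h, if_neg (by rintro ⟨h', -⟩; exact hsq h')]
      have hA : (PySem.Int.mod (count n) 2 == 0) = true := by rw [hm]; rfl
      have hB : (((Nat.sqrt n.toNat : Int)) ^ 2 == n) = false := by simp [hsq]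
      rw [hA, hB]
      simp

-- ===== VERDICT (by name: the statement is the Claim_ definition above) =====
theorem solution_spec : Claim_equal_solution := by
  intro left right _ hpre
  unfold Spec_solution solution solution_alt
  rcases hpre with hL | hR
  · apply PySem.List.foldl_congr_mem
    intro acc x hx
    have hx' := (PySem.List.mem_pyRange_one.mp hx).1
    exact step_eq x (le_trans hL hx') acc
  · rw [PySem.List.pyRange_one_eq_nil (by omega)]
    rfl
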